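-- pv_equiv track=rewrite | github.com/North14/learning-material | monte-carlo/monte-carlo-catan.py | get_corner_neighbors
-- ===== SOURCE A (Python) =====
-- def axial_to_cubed(q, r):
--     s = -q - r
--     return (q, r, s)
--
-- def get_corners_from_axial(coord):
--     # Given a coordinate in axial format (q, r), return the corners in cubed format
--     # https://www.redblobgames.com/grids/parts/
--
--     # corner_directions = [
--     #     (-1, 0, 1), (0, -1, 1), (1, -1, 0),
--     #     (+1, 0, -1), (0, +1, -1), (-1, +1, 0)
--     # ]
--     corner_directions = [
--         ( 2,-1,-1), ( 1, 1,-2), (-1, 2,-1),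
--         (-2, 1, 1), (-1,-1, 2), ( 1,-2, 1)
--     ]
--
--     qc, rc, sc = axial_to_cubed(*coord)
--     base = (3*qc, 3*rc, 3*sc)
--     return [(base[0]+dx, base[1]+dy, base[2]+dz) for (dx,dy,dz) in corner_directions]
--
-- def corner_to_hexes(corner_coord):
--     """
--     Given a corner coordinate, return the hexes that share this corner.
--     Corner coordinates are in scaled cube coordinates (3x scale).
--     """
--     cx, cy, cz = corner_coord
--
--     corner_directions = [
--         ( 2,-1,-1), ( 1, 1,-2), (-1, 2,-1),
--         (-2, 1, 1), (-1,-1, 2), ( 1,-2, 1)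
--     ]
--
--     hexes = []
--     for dx, dy, dz in corner_directions:
--         hx = (cx - dx) // 3
--         hy = (cy - dy) // 3
--         hz = (cz - dz) // 3
--
--         if hx + hy + hz == 0:
--             hexes.append((hx, hy))
--     return hexes
--
-- def get_corner_neighbors(coord):
--     """
--     Find all hexes that share at least one corner with the given hex.
--     Returns a set of (q, r) tuples in axial coordinates.
--     """
--     corners = get_corners_from_axial(coord)
--     neighbors = set()
--
--     for corner in corners:
--         sharing_hexes = corner_to_hexes(corner)
--         for hex_coord in sharing_hexes:
--             if hex_coord != coord:
--                 neighbors.add(hex_coord)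
--
--     return neighbors
-- ===== SOURCE B (Python) =====
-- def get_corner_neighbors(coord):
--     """
--     Find all hexes that share at least one corner with the given hex.
--     Returns a set of (q, r) tuples in axial coordinates.
--     """
--     q, r = coord
--     return {(q + dq, r + dr)
--             for dq, dr in [(1, -1), (1, 0), (0, 1), (-1, 1), (-1, 0), (0, -1)]}
-- ===== Notes on version B (the rewrite author's own statement) =====
-- stated objective: simpler
-- what changed: Replaces the corner-enumeration pipeline (scaled cube corners, floor-division recovery of hexes per corner, set accumulation) with the closed-form fact that the hexes sharing a corner are exactly the six axial neighbors, built by one comprehension over fixed offsets.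
import Mathlib
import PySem

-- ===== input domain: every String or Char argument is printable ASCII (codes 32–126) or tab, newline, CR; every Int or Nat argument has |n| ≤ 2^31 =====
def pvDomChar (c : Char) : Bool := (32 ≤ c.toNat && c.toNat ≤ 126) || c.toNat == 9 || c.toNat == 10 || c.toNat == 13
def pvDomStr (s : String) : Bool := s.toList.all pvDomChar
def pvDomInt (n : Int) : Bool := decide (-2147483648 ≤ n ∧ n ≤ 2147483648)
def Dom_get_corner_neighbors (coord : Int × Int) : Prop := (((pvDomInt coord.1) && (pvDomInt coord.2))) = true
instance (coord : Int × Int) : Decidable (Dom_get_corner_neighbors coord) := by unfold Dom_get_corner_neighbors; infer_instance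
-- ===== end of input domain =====

-- B replaces A's corner-enumeration pipeline with the six fixed axial neighbor offsets (simpler).

-- ===== PORT A =====
def axial_to_cubed (q r : Int) : Int × Int × Int :=
  (q, r, -q - r)

def get_corners_from_axial (coord : Int × Int) : List (Int × Int × Int) :=
  let corner_directions : List (Int × Int × Int) :=
    [(2, -1, -1), (1, 1, -2), (-1, 2, -1), (-2, 1, 1), (-1, -1, 2), (1, -2, 1)]
  let c := axial_to_cubed coord.1 coord.2
  let base : Int × Int × Int := (3 * c.1, 3 * c.2.1, 3 * c.2.2)
  corner_directions.map (fun d => (base.1 + d.1, base.2.1 + d.2.1, base.2.2 + d.2.2))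

def corner_to_hexes (corner_coord : Int × Int × Int) : List (Int × Int) :=
  let corner_directions : List (Int × Int × Int) :=
    [(2, -1, -1), (1, 1, -2), (-1, 2, -1), (-2, 1, 1), (-1, -1, 2), (1, -2, 1)]
  corner_directions.foldl (fun hexes d =>
    let hx := PySem.Int.floordiv (corner_coord.1 - d.1) 3
    let hy := PySem.Int.floordiv (corner_coord.2.1 - d.2.1) 3
    let hz := PySem.Int.floordiv (corner_coord.2.2 - d.2.2) 3
    if hx + hy + hz == 0 then hexes ++ [(hx, hy)] else hexes) []

def get_corner_neighbors (coord : Int × Int) : List (Int × Int) :=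
  let corners := get_corners_from_axial coord
  corners.foldl (fun neighbors corner =>
    (corner_to_hexes corner).foldl (fun nb hex_coord =>
      if hex_coord ≠ coord then PySem.Set.add nb hex_coord else nb) neighbors)
    PySem.Set.empty

-- ===== PORT B =====
def get_corner_neighbors_alt (coord : Int × Int) : List (Int × Int) :=
  PySem.Set.ofList
    ([((1 : Int), (-1 : Int)), (1, 0), (0, 1), (-1, 1), (-1, 0), (0, -1)].map
      (fun d => (coord.1 + d.1, coord.2 + d.2)))

-- ===== PRECONDITION & SPEC =====
def Spec_get_corner_neighbors (coord : Int × Int) (out : List (Int × Int)) : Prop := out = get_corner_neighbors_alt coord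
instance (coord : Int × Int) (out : List (Int × Int)) : Decidable (Spec_get_corner_neighbors coord out) := by unfold Spec_get_corner_neighbors; infer_instance

-- ===== CLAIM (what is proved, stated in full; the proofs are below) =====
def Claim_equal_get_corner_neighbors : Prop := ∀ (coord : Int × Int), Dom_get_corner_neighbors coord → Spec_get_corner_neighbors coord (get_corner_neighbors coord)

-- ===== LEMMAS AND PROOFS =====

-- floor division of 3*x + t - u by 3 splits off x (divisor 3 positive, so floordiv = ediv)
theorem pv_fd_split (x t u : Int) :
    PySem.Int.floordiv (3 * x + t - u) 3 = x + PySem.Int.floordiv (t - u) 3 := by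
  rw [PySem.Int.floordiv_eq_ediv_of_pos (by norm_num),
      PySem.Int.floordiv_eq_ediv_of_pos (by norm_num)]
  omega

-- in the corner-validity test q + r + s cancels, leaving a constant condition
theorem pv_cond (q r a b c : Int) :
    (q + a + (r + b) + (-q - r + c) == 0) = (a + b + c == 0) := by
  rw [show q + a + (r + b) + (-q - r + c) = a + b + c by ring]

-- the nine literal floor divisions the corner recovery produces
theorem pv_fd_m4 : PySem.Int.floordiv (-4) 3 = -2 := by decide
theorem pv_fd_m3 : PySem.Int.floordiv (-3) 3 = -1 := by decide
theorem pv_fd_m2 : PySem.Int.floordiv (-2) 3 = -1 := by decide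
theorem pv_fd_m1 : PySem.Int.floordiv (-1) 3 = -1 := by decide
theorem pv_fd_0 : PySem.Int.floordiv 0 3 = 0 := by decide
theorem pv_fd_1 : PySem.Int.floordiv 1 3 = 0 := by decide
theorem pv_fd_2 : PySem.Int.floordiv 2 3 = 0 := by decide
theorem pv_fd_3 : PySem.Int.floordiv 3 3 = 1 := by decide
theorem pv_fd_4 : PySem.Int.floordiv 4 3 = 1 := by decide

-- ===== VERDICT (by name: the statement is the Claim_ definition above) =====
set_option maxRecDepth 8000 in
theorem get_corner_neighbors_spec : Claim_equal_get_corner_neighbors := by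
  intro coord _
  obtain ⟨q, r⟩ := coord
  show get_corner_neighbors (q, r) = get_corner_neighbors_alt (q, r)
  simp only [get_corner_neighbors, get_corner_neighbors_alt, get_corners_from_axial,
    corner_to_hexes, axial_to_cubed, List.map, List.foldl, pv_fd_split, pv_cond]
  norm_num [pv_fd_m4, pv_fd_m3, pv_fd_m2, pv_fd_m1, pv_fd_0, pv_fd_1, pv_fd_2,
    pv_fd_3, pv_fd_4]
  norm_num [PySem.Set.ofList, PySem.Set.add, PySem.Set.empty, Prod.ext_iff]
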